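-- pv_equiv track=rewrite | github.com/VladimirZapryanov/SoftUni-Courses | Programming_Basics_with_Python/nested_loop_more_exercises/04._car_number.py | car_number
-- ===== SOURCE A (Python) =====
-- def car_number(start_number, end_number):
--     special_numbers = []
--
--     for n1 in range(start_number, end_number + 1):
--         for n2 in range(start_number, end_number + 1):
--             for n3 in range(start_number, end_number + 1):
--                 for n4 in range(start_number, end_number + 1):
--                     nums_sum = n2 + n3
--                     if n1 % 2 == 0 and n4 % 2 == 1 and n1 > n4 and nums_sum % 2 == 0:
--                         special_numbers.append(f'{n1}{n2}{n3}{n4}')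
--                     elif n1 % 2 == 1 and n4 % 2 == 0 and n1 > n4 and nums_sum % 2 == 0:
--                         special_numbers.append(f'{n1}{n2}{n3}{n4}')
--
--     return ' '.join(special_numbers)
-- ===== SOURCE B (Python) =====
-- def car_number(start_number, end_number):
--     stop = end_number + 1
--     parts = []
--     for n1 in range(start_number, stop):
--         # n4 runs with stride 2 over the values of parity opposite to n1, capped below n1
--         opp_start = start_number + ((n1 + 1 - start_number) % 2)
--         tails = range(opp_start, min(stop, n1), 2)
--         for n2 in range(start_number, stop):
--             # n2+n3 even iff n3 has n2's parity: stride-2 walk from the first such value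
--             same_start = start_number + ((n2 - start_number) % 2)
--             for n3 in range(same_start, stop, 2):
--                 for n4 in tails:
--                     parts.append(f'{n1}{n2}{n3}{n4}')
--     return ' '.join(parts)
-- ===== Notes on version B (the rewrite author's own statement) =====
-- stated objective: alternative
-- what changed: Instead of testing parity conditions on every (n1,n2,n3,n4) quadruple, B computes the admissible n3 and n4 values as stride-2 arithmetic ranges (n3 from the first value with n2's parity, n4 from the first value of parity opposite to n1, capped below n1) and assembles the strings with no per-quadruple tests.
import Mathlib
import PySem

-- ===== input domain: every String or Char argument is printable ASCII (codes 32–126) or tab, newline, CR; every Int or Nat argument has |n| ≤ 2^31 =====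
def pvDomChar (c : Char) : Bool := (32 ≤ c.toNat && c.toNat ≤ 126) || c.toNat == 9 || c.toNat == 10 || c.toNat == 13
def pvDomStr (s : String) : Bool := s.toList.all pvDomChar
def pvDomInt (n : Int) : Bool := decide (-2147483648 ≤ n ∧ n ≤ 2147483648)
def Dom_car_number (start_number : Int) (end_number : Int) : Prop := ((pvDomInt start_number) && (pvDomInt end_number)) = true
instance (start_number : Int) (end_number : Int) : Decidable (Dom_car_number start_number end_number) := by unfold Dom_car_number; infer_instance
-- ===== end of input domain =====

-- B replaces A's test on every (n1,n2,n3,n4) quadruple by stride-2 arithmetic ranges: n3 walks the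
-- values sharing n2's parity and n4 walks the values of opposite parity to n1 capped below n1
-- (objective: alternative — closed-form strides instead of per-quadruple parity tests).

-- ===== PORT A =====
def car_number (start_number : Int) (end_number : Int) : String :=
  let r := PySem.List.pyRange start_number (end_number + 1) 1
  let special_numbers : List String :=
    r.foldl (fun acc1 n1 =>
      r.foldl (fun acc2 n2 =>
        r.foldl (fun acc3 n3 =>
          r.foldl (fun acc4 n4 =>
            let nums_sum := n2 + n3
            if PySem.Int.mod n1 2 = 0 ∧ PySem.Int.mod n4 2 = 1 ∧ n1 > n4 ∧ PySem.Int.mod nums_sum 2 = 0 then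
              acc4 ++ [PySem.Int.toStr n1 ++ PySem.Int.toStr n2 ++ PySem.Int.toStr n3 ++ PySem.Int.toStr n4]
            else if PySem.Int.mod n1 2 = 1 ∧ PySem.Int.mod n4 2 = 0 ∧ n1 > n4 ∧ PySem.Int.mod nums_sum 2 = 0 then
              acc4 ++ [PySem.Int.toStr n1 ++ PySem.Int.toStr n2 ++ PySem.Int.toStr n3 ++ PySem.Int.toStr n4]
            else acc4) acc3) acc2) acc1) []
  PySem.Str.join " " special_numbers

-- ===== PORT B =====
def car_number_alt (start_number : Int) (end_number : Int) : String :=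
  let stop := end_number + 1
  let parts : List String :=
    (PySem.List.pyRange start_number stop 1).foldl (fun acc n1 =>
      let opp_start := start_number + PySem.Int.mod (n1 + 1 - start_number) 2
      let tails := PySem.List.pyRange opp_start (min stop n1) 2
      (PySem.List.pyRange start_number stop 1).foldl (fun acc2 n2 =>
        let same_start := start_number + PySem.Int.mod (n2 - start_number) 2
        (PySem.List.pyRange same_start stop 2).foldl (fun acc3 n3 =>
          tails.foldl (fun acc4 n4 =>
            acc4 ++ [PySem.Int.toStr n1 ++ PySem.Int.toStr n2 ++ PySem.Int.toStr n3 ++ PySem.Int.toStr n4]) acc3) acc2) acc) []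
  PySem.Str.join " " parts

-- ===== PRECONDITION & SPEC =====
def Spec_car_number (start_number : Int) (end_number : Int) (out : String) : Prop := out = car_number_alt start_number end_number
instance (start_number : Int) (end_number : Int) (out : String) : Decidable (Spec_car_number start_number end_number out) := by unfold Spec_car_number; infer_instance

-- ===== CLAIM (what is proved, stated in full; the proofs are below) =====
def Claim_equal_car_number : Prop := ∀ (start_number : Int) (end_number : Int), Dom_car_number start_number end_number → Spec_car_number start_number end_number (car_number start_number end_number)

-- ===== LEMMAS AND PROOFS =====

-- (l.filter p).flatMap g, expressed as a flatMap over l with an empty contribution off p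
theorem flatMap_filter_eq {α β : Type} (p : α → Bool) (g : α → List β) (l : List α) :
    (l.filter p).flatMap g = l.flatMap (fun x => if p x then g x else []) := by
  induction l with
  | nil => rfl
  | cons x xs ih =>
    by_cases h : p x = true <;> simp [List.flatMap_cons, h, ih]

-- A's innermost n4-loop: the two appending branches merge into one filter condition
theorem fold4_eq (n1 n2 n3 : Int) (l : List Int) (acc : List String) :
    l.foldl (fun acc4 n4 =>
      if PySem.Int.mod n1 2 = 0 ∧ PySem.Int.mod n4 2 = 1 ∧ n1 > n4 ∧ PySem.Int.mod (n2 + n3) 2 = 0 then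
        acc4 ++ [PySem.Int.toStr n1 ++ PySem.Int.toStr n2 ++ PySem.Int.toStr n3 ++ PySem.Int.toStr n4]
      else if PySem.Int.mod n1 2 = 1 ∧ PySem.Int.mod n4 2 = 0 ∧ n1 > n4 ∧ PySem.Int.mod (n2 + n3) 2 = 0 then
        acc4 ++ [PySem.Int.toStr n1 ++ PySem.Int.toStr n2 ++ PySem.Int.toStr n3 ++ PySem.Int.toStr n4]
      else acc4) acc
    = acc ++ (l.filter (fun n4 =>
        decide (PySem.Int.mod (n2 + n3) 2 = 0 ∧ PySem.Int.mod n4 2 ≠ PySem.Int.mod n1 2 ∧ n4 < n1))).map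
        (fun n4 => PySem.Int.toStr n1 ++ PySem.Int.toStr n2 ++ PySem.Int.toStr n3 ++ PySem.Int.toStr n4) := by
  have hbody : (fun (acc4 : List String) (n4 : Int) =>
      if PySem.Int.mod n1 2 = 0 ∧ PySem.Int.mod n4 2 = 1 ∧ n1 > n4 ∧ PySem.Int.mod (n2 + n3) 2 = 0 then
        acc4 ++ [PySem.Int.toStr n1 ++ PySem.Int.toStr n2 ++ PySem.Int.toStr n3 ++ PySem.Int.toStr n4]
      else if PySem.Int.mod n1 2 = 1 ∧ PySem.Int.mod n4 2 = 0 ∧ n1 > n4 ∧ PySem.Int.mod (n2 + n3) 2 = 0 then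
        acc4 ++ [PySem.Int.toStr n1 ++ PySem.Int.toStr n2 ++ PySem.Int.toStr n3 ++ PySem.Int.toStr n4]
      else acc4)
      = (fun acc4 n4 =>
        if PySem.Int.mod (n2 + n3) 2 = 0 ∧ PySem.Int.mod n4 2 ≠ PySem.Int.mod n1 2 ∧ n4 < n1 then
          acc4 ++ [PySem.Int.toStr n1 ++ PySem.Int.toStr n2 ++ PySem.Int.toStr n3 ++ PySem.Int.toStr n4]
        else acc4) := by
    funext acc4 n4
    have h1 := PySem.Int.mod_two_eq n1
    have h4 := PySem.Int.mod_two_eq n4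
    split_ifs with hA hB hC hD hE <;> first | rfl | (exfalso; omega)
  rw [hbody, PySem.List.foldl_append_ite]

-- ===== VERDICT (by name: the statement is the Claim_ definition above) =====
-- a stride-2 pyRange starting at the first value ≥ s of its parity is a parity filter of the stride-1 range
theorem pyRange_step2_eq_filter (s a b : Int) (h1 : s ≤ a) (h2 : a ≤ s + 1) :
    PySem.List.pyRange a b 2 =
      (PySem.List.pyRange s b 1).filter
        (fun x => decide (PySem.Int.mod x 2 = PySem.Int.mod a 2)) := by
  have hp2 : (0:Int) < 2 := by norm_num
  have pw1 : (PySem.List.pyRange a b 2).Pairwise (· < ·) := by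
    rw [PySem.List.pyRange_of_pos a b hp2]
    exact List.Pairwise.map _ (fun k1 k2 hk => by push_cast; omega) List.pairwise_lt_range
  have pw2 : ((PySem.List.pyRange s b 1).filter
      (fun x => decide (PySem.Int.mod x 2 = PySem.Int.mod a 2))).Pairwise (· < ·) :=
    List.Pairwise.filter _ (PySem.List.pairwise_lt_pyRange_one s b)
  refine List.Perm.eq_of_pairwise (fun x y _ _ hxy hyx => by omega) pw1 pw2 ?_
  refine (List.perm_ext_iff_of_nodup pw1.nodup pw2.nodup).mpr ?_
  intro x
  rw [List.mem_filter, PySem.List.mem_pyRange_iff_of_pos hp2, PySem.List.mem_pyRange_one]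
  simp only [decide_eq_true_eq, PySem.Int.mod_eq_emod_of_pos hp2]
  omega
-- capping a stride-1 pyRange with min is a strict-bound filter
theorem pyRange_min_eq_filter (s b c : Int) :
    PySem.List.pyRange s (min b c) 1 =
      (PySem.List.pyRange s b 1).filter (fun x => decide (x < c)) := by
  have pw1 := PySem.List.pairwise_lt_pyRange_one s (min b c)
  have pw2 : ((PySem.List.pyRange s b 1).filter (fun x => decide (x < c))).Pairwise (· < ·) :=
    List.Pairwise.filter _ (PySem.List.pairwise_lt_pyRange_one s b)
  refine List.Perm.eq_of_pairwise (fun x y _ _ hxy hyx => by omega) pw1 pw2 ?_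
  refine (List.perm_ext_iff_of_nodup pw1.nodup pw2.nodup).mpr ?_
  intro x
  rw [List.mem_filter, PySem.List.mem_pyRange_one, PySem.List.mem_pyRange_one]
  simp only [decide_eq_true_eq]
  omega

theorem car_number_spec : Claim_equal_car_number := by
  intro s e _
  unfold Spec_car_number car_number car_number_alt
  set r := PySem.List.pyRange s (e + 1) 1 with hr
  refine congrArg (PySem.Str.join " ") ?_
  -- A's nested loops as flatMaps
  have hA : ∀ (acc : List String),
      r.foldl (fun acc1 n1 =>
        r.foldl (fun acc2 n2 =>
          r.foldl (fun acc3 n3 =>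
            r.foldl (fun acc4 n4 =>
              let nums_sum := n2 + n3
              if PySem.Int.mod n1 2 = 0 ∧ PySem.Int.mod n4 2 = 1 ∧ n1 > n4 ∧ PySem.Int.mod nums_sum 2 = 0 then
                acc4 ++ [PySem.Int.toStr n1 ++ PySem.Int.toStr n2 ++ PySem.Int.toStr n3 ++ PySem.Int.toStr n4]
              else if PySem.Int.mod n1 2 = 1 ∧ PySem.Int.mod n4 2 = 0 ∧ n1 > n4 ∧ PySem.Int.mod nums_sum 2 = 0 then
                acc4 ++ [PySem.Int.toStr n1 ++ PySem.Int.toStr n2 ++ PySem.Int.toStr n3 ++ PySem.Int.toStr n4]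
              else acc4) acc3) acc2) acc1) acc
      = acc ++ r.flatMap (fun n1 => r.flatMap (fun n2 => r.flatMap (fun n3 =>
          (r.filter (fun n4 =>
            decide (PySem.Int.mod (n2 + n3) 2 = 0 ∧ PySem.Int.mod n4 2 ≠ PySem.Int.mod n1 2 ∧ n4 < n1))).map
            (fun n4 => PySem.Int.toStr n1 ++ PySem.Int.toStr n2 ++ PySem.Int.toStr n3 ++ PySem.Int.toStr n4)))) := by
    intro acc
    have h1 : (fun (acc1 : List String) (n1 : Int) =>
        r.foldl (fun acc2 n2 =>
          r.foldl (fun acc3 n3 =>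
            r.foldl (fun acc4 n4 =>
              let nums_sum := n2 + n3
              if PySem.Int.mod n1 2 = 0 ∧ PySem.Int.mod n4 2 = 1 ∧ n1 > n4 ∧ PySem.Int.mod nums_sum 2 = 0 then
                acc4 ++ [PySem.Int.toStr n1 ++ PySem.Int.toStr n2 ++ PySem.Int.toStr n3 ++ PySem.Int.toStr n4]
              else if PySem.Int.mod n1 2 = 1 ∧ PySem.Int.mod n4 2 = 0 ∧ n1 > n4 ∧ PySem.Int.mod nums_sum 2 = 0 then
                acc4 ++ [PySem.Int.toStr n1 ++ PySem.Int.toStr n2 ++ PySem.Int.toStr n3 ++ PySem.Int.toStr n4]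
              else acc4) acc3) acc2) acc1)
        = (fun acc1 n1 => acc1 ++ r.flatMap (fun n2 => r.flatMap (fun n3 =>
            (r.filter (fun n4 =>
              decide (PySem.Int.mod (n2 + n3) 2 = 0 ∧ PySem.Int.mod n4 2 ≠ PySem.Int.mod n1 2 ∧ n4 < n1))).map
              (fun n4 => PySem.Int.toStr n1 ++ PySem.Int.toStr n2 ++ PySem.Int.toStr n3 ++ PySem.Int.toStr n4)))) := by
      funext acc1 n1
      have h2 : (fun (acc2 : List String) (n2 : Int) =>
          r.foldl (fun acc3 n3 =>
            r.foldl (fun acc4 n4 =>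
              let nums_sum := n2 + n3
              if PySem.Int.mod n1 2 = 0 ∧ PySem.Int.mod n4 2 = 1 ∧ n1 > n4 ∧ PySem.Int.mod nums_sum 2 = 0 then
                acc4 ++ [PySem.Int.toStr n1 ++ PySem.Int.toStr n2 ++ PySem.Int.toStr n3 ++ PySem.Int.toStr n4]
              else if PySem.Int.mod n1 2 = 1 ∧ PySem.Int.mod n4 2 = 0 ∧ n1 > n4 ∧ PySem.Int.mod nums_sum 2 = 0 then
                acc4 ++ [PySem.Int.toStr n1 ++ PySem.Int.toStr n2 ++ PySem.Int.toStr n3 ++ PySem.Int.toStr n4]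
              else acc4) acc3) acc2)
          = (fun acc2 n2 => acc2 ++ r.flatMap (fun n3 =>
              (r.filter (fun n4 =>
                decide (PySem.Int.mod (n2 + n3) 2 = 0 ∧ PySem.Int.mod n4 2 ≠ PySem.Int.mod n1 2 ∧ n4 < n1))).map
                (fun n4 => PySem.Int.toStr n1 ++ PySem.Int.toStr n2 ++ PySem.Int.toStr n3 ++ PySem.Int.toStr n4))) := by
        funext acc2 n2
        have h3 : (fun (acc3 : List String) (n3 : Int) =>
            r.foldl (fun acc4 n4 =>
              let nums_sum := n2 + n3
              if PySem.Int.mod n1 2 = 0 ∧ PySem.Int.mod n4 2 = 1 ∧ n1 > n4 ∧ PySem.Int.mod nums_sum 2 = 0 then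
                acc4 ++ [PySem.Int.toStr n1 ++ PySem.Int.toStr n2 ++ PySem.Int.toStr n3 ++ PySem.Int.toStr n4]
              else if PySem.Int.mod n1 2 = 1 ∧ PySem.Int.mod n4 2 = 0 ∧ n1 > n4 ∧ PySem.Int.mod nums_sum 2 = 0 then
                acc4 ++ [PySem.Int.toStr n1 ++ PySem.Int.toStr n2 ++ PySem.Int.toStr n3 ++ PySem.Int.toStr n4]
              else acc4) acc3)
            = (fun acc3 n3 => acc3 ++
              (r.filter (fun n4 =>
                decide (PySem.Int.mod (n2 + n3) 2 = 0 ∧ PySem.Int.mod n4 2 ≠ PySem.Int.mod n1 2 ∧ n4 < n1))).map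
                (fun n4 => PySem.Int.toStr n1 ++ PySem.Int.toStr n2 ++ PySem.Int.toStr n3 ++ PySem.Int.toStr n4)) := by
          funext acc3 n3
          exact fold4_eq n1 n2 n3 r acc3
        rw [h3, PySem.List.foldl_append_eq_flatMap]
      rw [h2, PySem.List.foldl_append_eq_flatMap]
    rw [h1, PySem.List.foldl_append_eq_flatMap]
  -- B's nested append loops as flatMaps
  have hB : ∀ (acc : List String),
      r.foldl (fun acc n1 =>
        r.foldl (fun acc2 n2 =>
          (PySem.List.pyRange (s + PySem.Int.mod (n2 - s) 2) (e + 1) 2).foldl (fun acc3 n3 =>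
            (PySem.List.pyRange (s + PySem.Int.mod (n1 + 1 - s) 2) (min (e + 1) n1) 2).foldl
              (fun acc4 n4 =>
                acc4 ++ [PySem.Int.toStr n1 ++ PySem.Int.toStr n2 ++ PySem.Int.toStr n3 ++ PySem.Int.toStr n4]) acc3) acc2) acc) acc
      = acc ++ r.flatMap (fun n1 => r.flatMap (fun n2 =>
          (PySem.List.pyRange (s + PySem.Int.mod (n2 - s) 2) (e + 1) 2).flatMap (fun n3 =>
            (PySem.List.pyRange (s + PySem.Int.mod (n1 + 1 - s) 2) (min (e + 1) n1) 2).map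
              (fun n4 => PySem.Int.toStr n1 ++ PySem.Int.toStr n2 ++ PySem.Int.toStr n3 ++ PySem.Int.toStr n4)))) := by
    intro acc
    have h1 : (fun (acc : List String) (n1 : Int) =>
        r.foldl (fun acc2 n2 =>
          (PySem.List.pyRange (s + PySem.Int.mod (n2 - s) 2) (e + 1) 2).foldl (fun acc3 n3 =>
            (PySem.List.pyRange (s + PySem.Int.mod (n1 + 1 - s) 2) (min (e + 1) n1) 2).foldl
              (fun acc4 n4 =>
                acc4 ++ [PySem.Int.toStr n1 ++ PySem.Int.toStr n2 ++ PySem.Int.toStr n3 ++ PySem.Int.toStr n4]) acc3) acc2) acc)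
        = (fun acc n1 => acc ++ r.flatMap (fun n2 =>
            (PySem.List.pyRange (s + PySem.Int.mod (n2 - s) 2) (e + 1) 2).flatMap (fun n3 =>
              (PySem.List.pyRange (s + PySem.Int.mod (n1 + 1 - s) 2) (min (e + 1) n1) 2).map
                (fun n4 => PySem.Int.toStr n1 ++ PySem.Int.toStr n2 ++ PySem.Int.toStr n3 ++ PySem.Int.toStr n4)))) := by
      funext acc n1
      have h2 : (fun (acc2 : List String) (n2 : Int) =>
          (PySem.List.pyRange (s + PySem.Int.mod (n2 - s) 2) (e + 1) 2).foldl (fun acc3 n3 =>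
            (PySem.List.pyRange (s + PySem.Int.mod (n1 + 1 - s) 2) (min (e + 1) n1) 2).foldl
              (fun acc4 n4 =>
                acc4 ++ [PySem.Int.toStr n1 ++ PySem.Int.toStr n2 ++ PySem.Int.toStr n3 ++ PySem.Int.toStr n4]) acc3) acc2)
          = (fun acc2 n2 => acc2 ++
            (PySem.List.pyRange (s + PySem.Int.mod (n2 - s) 2) (e + 1) 2).flatMap (fun n3 =>
              (PySem.List.pyRange (s + PySem.Int.mod (n1 + 1 - s) 2) (min (e + 1) n1) 2).map
                (fun n4 => PySem.Int.toStr n1 ++ PySem.Int.toStr n2 ++ PySem.Int.toStr n3 ++ PySem.Int.toStr n4))) := by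
        funext acc2 n2
        have h3 : (fun (acc3 : List String) (n3 : Int) =>
            (PySem.List.pyRange (s + PySem.Int.mod (n1 + 1 - s) 2) (min (e + 1) n1) 2).foldl
              (fun acc4 n4 =>
                acc4 ++ [PySem.Int.toStr n1 ++ PySem.Int.toStr n2 ++ PySem.Int.toStr n3 ++ PySem.Int.toStr n4]) acc3)
            = (fun acc3 n3 => acc3 ++
              (PySem.List.pyRange (s + PySem.Int.mod (n1 + 1 - s) 2) (min (e + 1) n1) 2).map
                (fun n4 => PySem.Int.toStr n1 ++ PySem.Int.toStr n2 ++ PySem.Int.toStr n3 ++ PySem.Int.toStr n4)) := by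
          funext acc3 n3
          exact PySem.List.foldl_append_singleton_eq_map _ _ _
        rw [h3, PySem.List.foldl_append_eq_flatMap]
      rw [h2, PySem.List.foldl_append_eq_flatMap]
    rw [h1, PySem.List.foldl_append_eq_flatMap]
  rw [hA, hB]
  congr 1
  apply List.flatMap_congr
  intro n1 _
  apply List.flatMap_congr
  intro n2 _
  have hmnn2 := PySem.Int.mod_nonneg (n2 - s) (show (0:Int) < 2 by norm_num)
  have hmln2 := PySem.Int.mod_lt (n2 - s) (show (0:Int) < 2 by norm_num)
  have hmnn1 := PySem.Int.mod_nonneg (n1 + 1 - s) (show (0:Int) < 2 by norm_num)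
  have hmln1 := PySem.Int.mod_lt (n1 + 1 - s) (show (0:Int) < 2 by norm_num)
  have hsame : PySem.List.pyRange (s + PySem.Int.mod (n2 - s) 2) (e + 1) 2
      = r.filter (fun n3 => decide (PySem.Int.mod (n2 + n3) 2 = 0)) := by
    rw [pyRange_step2_eq_filter s _ _ (by omega) (by omega), hr]
    apply List.filter_congr
    intro n3 _
    rw [Bool.eq_iff_iff]
    simp only [decide_eq_true_eq, PySem.Int.mod_eq_emod_of_pos (show (0:Int) < 2 by norm_num)]
    omega
  have htails : PySem.List.pyRange (s + PySem.Int.mod (n1 + 1 - s) 2) (min (e + 1) n1) 2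
      = r.filter (fun n4 => decide (PySem.Int.mod n4 2 ≠ PySem.Int.mod n1 2 ∧ n4 < n1)) := by
    rw [pyRange_step2_eq_filter s _ _ (by omega) (by omega), pyRange_min_eq_filter, hr,
      List.filter_filter]
    apply List.filter_congr
    intro n4 _
    rw [Bool.eq_iff_iff]
    simp only [Bool.and_eq_true, decide_eq_true_eq,
      PySem.Int.mod_eq_emod_of_pos (show (0:Int) < 2 by norm_num)]
    omega
  rw [hsame, htails, flatMap_filter_eq]
  apply List.flatMap_congr
  intro n3 _
  by_cases hE : PySem.Int.mod (n2 + n3) 2 = 0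
  · rw [if_pos (decide_eq_true hE)]
    have hfil : r.filter (fun n4 =>
        decide (PySem.Int.mod (n2 + n3) 2 = 0 ∧ PySem.Int.mod n4 2 ≠ PySem.Int.mod n1 2 ∧ n4 < n1))
        = r.filter (fun n4 => decide (PySem.Int.mod n4 2 ≠ PySem.Int.mod n1 2 ∧ n4 < n1)) := by
      apply List.filter_congr
      intro n4 _
      rw [Bool.eq_iff_iff]
      simp only [decide_eq_true_eq]
      exact ⟨fun hq => hq.2, fun hq => ⟨hE, hq⟩⟩
    rw [hfil]
  · rw [if_neg (by simp only [decide_eq_true_eq]; exact hE)]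
    have hnil : r.filter (fun n4 =>
        decide (PySem.Int.mod (n2 + n3) 2 = 0 ∧ PySem.Int.mod n4 2 ≠ PySem.Int.mod n1 2 ∧ n4 < n1)) = [] := by
      apply List.filter_eq_nil_iff.mpr
      intro n4 _
      simp only [decide_eq_true_eq]
      intro h
      exact hE h.1
    rw [hnil]; rfl
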